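-- pv_equiv track=rewrite | github.com/kingkillery/llm_wiki_prompt_packet | installers/install_obsidian_agent_memory.py | repo_runtime_candidate_relpaths
-- ===== SOURCE A (Python) =====
-- REPO_RUNTIME_DEFAULT_PATHS = {
--     "g-kade": "deps/pk-skills1/gstack/g-kade",
--     "gstack": "deps/pk-skills1/gstack",
-- }
--
-- REPO_RUNTIME_PREFERRED_CANDIDATES = {
--     "g-kade": (
--         "deps/pk-skills1/gstack/g-kade",
--         "deps/pk-skills1/g-kade",
--     ),
--     "gstack": (
--         "deps/pk-skills1/gstack",
--     ),
-- }
--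
-- REPO_RUNTIME_FALLBACK_ROOTS = (
--     ".llm-wiki/deps",
--     "vendor",
--     "deps",
--     "dependencies",
--     "submodules",
-- )
--
-- def normalize_path_string(value: str) -> str:
--     return value.strip().rstrip("/\\")
--
-- def repo_runtime_candidate_relpaths(name: str, configured_path: str) -> list[str]:
--     normalized = normalize_path_string(configured_path) or REPO_RUNTIME_DEFAULT_PATHS[name]
--     candidates = [normalized]
--     for preferred in REPO_RUNTIME_PREFERRED_CANDIDATES.get(name, ()):
--         if preferred not in candidates:
--             candidates.append(preferred)
--     for root in REPO_RUNTIME_FALLBACK_ROOTS: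
--         fallback = f"{root}/{name}"
--         if fallback not in candidates:
--             candidates.append(fallback)
--     return candidates
-- ===== SOURCE B (Python) =====
-- REPO_RUNTIME_DEFAULT_PATHS = {
--     "g-kade": "deps/pk-skills1/gstack/g-kade",
--     "gstack": "deps/pk-skills1/gstack",
-- }
--
-- REPO_RUNTIME_PREFERRED_CANDIDATES = {
--     "g-kade": (
--         "deps/pk-skills1/gstack/g-kade",
--         "deps/pk-skills1/g-kade",
--     ),
--     "gstack": (
--         "deps/pk-skills1/gstack",
--     ),
-- }
--
-- REPO_RUNTIME_FALLBACK_ROOTS = (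
--     ".llm-wiki/deps",
--     "vendor",
--     "deps",
--     "dependencies",
--     "submodules",
-- )
--
-- def normalize_path_string(value: str) -> str:
--     return value.strip().rstrip("/\\")
--
-- def repo_runtime_candidate_relpaths(name: str, configured_path: str) -> list[str]:
--     normalized = normalize_path_string(configured_path) or REPO_RUNTIME_DEFAULT_PATHS[name]
--     # The static candidates (preferred ones for `name`, then one per fallback root)
--     # are pairwise distinct for every name, so the only possible duplicate in the
--     # result is `normalized` itself: filter it out of the static tail in one pass.
--     tail = [
--         *REPO_RUNTIME_PREFERRED_CANDIDATES.get(name, ()),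
--         *(f"{root}/{name}" for root in REPO_RUNTIME_FALLBACK_ROOTS),
--     ]
--     return [normalized] + [c for c in tail if c != normalized]
-- ===== Notes on version B (the rewrite author's own statement) =====
-- stated objective: alternative
-- what changed: Replaces A's membership-checked dedup loops with a single filter pass: the static candidates (preferred + one per fallback root) are pairwise distinct for every name, so the only possible duplicate is the normalized path, which B filters out of the static tail.
import Mathlib
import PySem

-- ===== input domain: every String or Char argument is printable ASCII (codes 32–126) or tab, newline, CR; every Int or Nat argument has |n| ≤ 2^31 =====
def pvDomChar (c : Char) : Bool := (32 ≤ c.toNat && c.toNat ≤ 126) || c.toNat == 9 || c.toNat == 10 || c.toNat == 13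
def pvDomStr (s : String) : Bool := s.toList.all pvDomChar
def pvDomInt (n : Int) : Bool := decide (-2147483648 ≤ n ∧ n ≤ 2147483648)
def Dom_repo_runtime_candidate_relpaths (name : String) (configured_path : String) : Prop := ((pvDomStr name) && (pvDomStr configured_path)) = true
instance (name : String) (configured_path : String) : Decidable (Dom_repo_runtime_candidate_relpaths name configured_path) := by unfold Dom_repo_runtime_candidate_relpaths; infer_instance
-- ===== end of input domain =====

-- B exploits that the static candidates (preferred ones for `name`, then one per fallback root) are
-- pairwise distinct for every name, so instead of A's membership-checked dedup loops it filters the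
-- single possible duplicate (`normalized`) out of the static tail in one pass; return values proved equal.

-- shared module-level context (constants and normalize_path_string, present in both Source A and Source B)
def pvDefaultPaths : PySem.Dict String String :=
  PySem.Dict.ofList [("g-kade", "deps/pk-skills1/gstack/g-kade"), ("gstack", "deps/pk-skills1/gstack")]

def pvPreferredCandidates : PySem.Dict String (List String) :=
  PySem.Dict.ofList [("g-kade", ["deps/pk-skills1/gstack/g-kade", "deps/pk-skills1/g-kade"]),
                     ("gstack", ["deps/pk-skills1/gstack"])]

def pvFallbackRoots : List String :=
  [".llm-wiki/deps", "vendor", "deps", "dependencies", "submodules"]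

-- value.strip().rstrip("/\\"): PySem.Str.strip, then a hand-ported rstrip(chars) — exact:
-- Python's rstrip("/\\") removes the maximal trailing run of '/' and '\' characters.
def normalize_path_string (value : String) : String :=
  String.ofList ((((PySem.Str.strip value).toList.reverse.dropWhile (fun c => c == '/' || c == '\\')).reverse))

-- ===== PORT A =====
def repo_runtime_candidate_relpaths (name : String) (configured_path : String) : List String :=
  -- REPO_RUNTIME_DEFAULT_PATHS[name] raises KeyError when the key is missing; Pre_ excludes
  -- that case, so the .getD "" default is never reached on admitted inputs.
  let normalized :=
    if normalize_path_string configured_path = "" then (pvDefaultPaths.get? name).getD ""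
    else normalize_path_string configured_path
  let candidates := [normalized]
  let candidates :=
    (pvPreferredCandidates.getD name []).foldl
      (fun acc preferred => if preferred ∈ acc then acc else acc ++ [preferred]) candidates
  pvFallbackRoots.foldl
    (fun acc root =>
      let fallback := root ++ "/" ++ name
      if fallback ∈ acc then acc else acc ++ [fallback]) candidates

-- ===== PORT B =====
def repo_runtime_candidate_relpaths_alt (name : String) (configured_path : String) : List String :=
  let normalized :=
    if normalize_path_string configured_path = "" then (pvDefaultPaths.get? name).getD ""
    else normalize_path_string configured_path
  let tail := pvPreferredCandidates.getD name []
                ++ pvFallbackRoots.map (fun root => root ++ "/" ++ name)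
  [normalized] ++ tail.filter (fun c => c != normalized)

-- ===== PRECONDITION & SPEC =====
-- Pre_ excludes exactly the inputs where A raises KeyError: configured_path normalizes to ""
-- (everything after whitespace-stripping is '/' or '\') while name is not a known default key.
def Pre_repo_runtime_candidate_relpaths (name : String) (configured_path : String) : Prop :=
  ((PySem.Str.strip configured_path).toList.any (fun c => !(c == '/' || c == '\\'))) = true
  ∨ name = "g-kade" ∨ name = "gstack"
instance (name : String) (configured_path : String) : Decidable (Pre_repo_runtime_candidate_relpaths name configured_path) := by unfold Pre_repo_runtime_candidate_relpaths; infer_instance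

def pvWitness_repo_runtime_candidate_relpaths : String × String := ("tool", "pkgs/tool/")

def Spec_repo_runtime_candidate_relpaths (name : String) (configured_path : String) (out : List String) : Prop := out = repo_runtime_candidate_relpaths_alt name configured_path
instance (name : String) (configured_path : String) (out : List String) : Decidable (Spec_repo_runtime_candidate_relpaths name configured_path out) := by unfold Spec_repo_runtime_candidate_relpaths; infer_instance

-- ===== CLAIM (what is proved, stated in full; the proofs are below) =====
def Claim_equal_repo_runtime_candidate_relpaths : Prop := ∀ (name : String) (configured_path : String), Dom_repo_runtime_candidate_relpaths name configured_path → Pre_repo_runtime_candidate_relpaths name configured_path → Spec_repo_runtime_candidate_relpaths name configured_path (repo_runtime_candidate_relpaths name configured_path)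

-- ===== LEMMAS AND PROOFS =====

-- A's membership-checked append fold over a duplicate-free list just appends the not-yet-seen elements
theorem pv_fold_dedup (l : List String) :
    ∀ acc : List String, l.Nodup →
    l.foldl (fun acc x => if x ∈ acc then acc else acc ++ [x]) acc
      = acc ++ l.filter (fun x => decide (x ∉ acc)) := by
  induction l with
  | nil => intro acc _; simp
  | cons x l ih =>
    intro acc hnd
    have hx_not : x ∉ l := (List.nodup_cons.mp hnd).1
    have hnd' : l.Nodup := (List.nodup_cons.mp hnd).2
    by_cases hx : x ∈ acc
    · simp only [List.foldl_cons, if_pos hx, List.filter_cons]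
      rw [ih acc hnd']
      simp [hx]
    · simp only [List.foldl_cons, if_neg hx, List.filter_cons]
      rw [ih (acc ++ [x]) hnd']
      have hfe : l.filter (fun y => decide (y ∉ acc ++ [x]))
          = l.filter (fun y => decide (y ∉ acc)) := by
        apply List.filter_congr
        intro y hy
        have hyx : y ≠ x := fun h => hx_not (h ▸ hy)
        simp [List.mem_append, hyx]
      rw [hfe]
      simp [hx, List.append_assoc]

-- the static tail is duplicate-free for every name
theorem pv_tail_nodup (name : String) :
    (pvPreferredCandidates.getD name []
      ++ pvFallbackRoots.map (fun root => root ++ "/" ++ name)).Nodup := by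
  by_cases h1 : name = "g-kade"
  · subst h1; decide
  by_cases h2 : name = "gstack"
  · subst h2; decide
  have h1' : "g-kade" ≠ name := fun h => h1 h.symm
  have h2' : "gstack" ≠ name := fun h => h2 h.symm
  have hmk : pvPreferredCandidates
      = PySem.Dict.mk [("g-kade", ["deps/pk-skills1/gstack/g-kade", "deps/pk-skills1/g-kade"]),
                       ("gstack", ["deps/pk-skills1/gstack"])] := by rfl
  have hpref : pvPreferredCandidates.getD name [] = [] := by
    simp [hmk, PySem.Dict.getD, PySem.Dict.get?, h1', h2']
  rw [hpref, List.nil_append]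
  apply List.Nodup.map_on
  · intro x hx y hy hxy
    have hlen : x.length = y.length := by
      have := congrArg String.length hxy
      simp only [String.length_append] at this
      omega
    fin_cases hx <;> fin_cases hy <;> first | rfl | (exfalso; simp_all)
  · decide

-- the whole dedup pipeline of A, for any first element n, equals B's single filter pass
theorem pv_pipeline (name : String) (n : String) :
    pvFallbackRoots.foldl
      (fun acc root =>
        let fallback := root ++ "/" ++ name
        if fallback ∈ acc then acc else acc ++ [fallback])
      ((pvPreferredCandidates.getD name []).foldl
        (fun acc preferred => if preferred ∈ acc then acc else acc ++ [preferred]) [n])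
    = [n] ++ (pvPreferredCandidates.getD name []
        ++ pvFallbackRoots.map (fun root => root ++ "/" ++ name)).filter (fun c => c != n) := by
  have hmap : pvFallbackRoots.foldl
      (fun acc root =>
        let fallback := root ++ "/" ++ name
        if fallback ∈ acc then acc else acc ++ [fallback])
      ((pvPreferredCandidates.getD name []).foldl
        (fun acc preferred => if preferred ∈ acc then acc else acc ++ [preferred]) [n])
    = (pvFallbackRoots.map (fun root => root ++ "/" ++ name)).foldl
        (fun acc x => if x ∈ acc then acc else acc ++ [x])
        ((pvPreferredCandidates.getD name []).foldl
          (fun acc x => if x ∈ acc then acc else acc ++ [x]) [n]) := by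
    rw [List.foldl_map]
  rw [hmap, ← List.foldl_append, pv_fold_dedup _ [n] (pv_tail_nodup name)]
  congr 1
  apply List.filter_congr
  intro y _
  by_cases h : y = n <;> simp [bne, h]

-- ===== VERDICT (by name: the statement is the Claim_ definition above) =====
theorem repo_runtime_candidate_relpaths_spec : Claim_equal_repo_runtime_candidate_relpaths := by
  intro name configured_path _ _
  unfold Spec_repo_runtime_candidate_relpaths
  show repo_runtime_candidate_relpaths name configured_path
      = repo_runtime_candidate_relpaths_alt name configured_path
  unfold repo_runtime_candidate_relpaths repo_runtime_candidate_relpaths_alt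
  exact pv_pipeline name _
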